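-- pv_equiv track=rewrite | github.com/jessicabajamundi/studentportal | app.py | calculate_consecutive_absences
-- ===== SOURCE A (Python) =====
-- def calculate_consecutive_absences(attendance_records):
--     """Calculate consecutive absences"""
--     if not attendance_records:
--         return 0
--
--     consecutive = 0
--     max_consecutive = 0
--
--     for record in sorted(attendance_records, key=lambda x: x['date'], reverse=True):
--         if record['status'] == 'absent':
--             consecutive += 1
--             max_consecutive = max(max_consecutive, consecutive)
--         else:
--             consecutive = 0
--
--     return max_consecutive
-- ===== SOURCE B (Python) =====
-- def calculate_consecutive_absences(attendance_records):
--     """Calculate consecutive absences"""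
--     statuses = [r['status'] for r in
--                 sorted(attendance_records, key=lambda x: x['date'], reverse=True)]
--     # group the status sequence into maximal runs of equal statuses
--     runs = []
--     i, n = 0, len(statuses)
--     while i < n:
--         j = i + 1
--         while j < n and statuses[j] == statuses[i]:
--             j += 1
--         runs.append((statuses[i], j - i))
--         i = j
--     return max([length for status, length in runs if status == 'absent'], default=0)
-- ===== Notes on version B (the rewrite author's own statement) =====
-- stated objective: alternative
-- what changed: Replaces the running counter/max accumulator scan with a group-into-runs decomposition: the sorted status sequence is split into maximal runs of equal statuses and the answer is the max length of an 'absent' run (default 0).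
import Mathlib
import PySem

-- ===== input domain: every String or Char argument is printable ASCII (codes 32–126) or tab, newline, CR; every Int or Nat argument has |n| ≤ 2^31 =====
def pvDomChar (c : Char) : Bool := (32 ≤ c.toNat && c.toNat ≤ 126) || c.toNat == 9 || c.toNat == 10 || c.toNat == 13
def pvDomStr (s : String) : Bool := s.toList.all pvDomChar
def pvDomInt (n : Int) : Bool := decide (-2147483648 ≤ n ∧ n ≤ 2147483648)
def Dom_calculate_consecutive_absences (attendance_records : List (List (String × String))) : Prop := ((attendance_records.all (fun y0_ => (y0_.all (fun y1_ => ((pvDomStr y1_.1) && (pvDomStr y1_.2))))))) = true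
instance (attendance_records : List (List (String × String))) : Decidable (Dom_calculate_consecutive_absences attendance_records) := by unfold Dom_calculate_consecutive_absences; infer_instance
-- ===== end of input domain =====

-- B replaces A's running counter/max scan with a split-into-runs decomposition (same sort, same cost); equal return values are proved on Pre_ (records that carry both keys).

-- dict lookup r[k] (first match in the association list); total stand-in: Pre_ guarantees the key is present
def pvLookup (r : List (String × String)) (k : String) : String :=
  ((r.find? (fun p => p.1 == k)).map (fun p => p.2)).getD ""

-- ===== PORT A =====
def calculate_consecutive_absences (attendance_records : List (List (String × String))) : Int :=
  if attendance_records = [] then 0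
  else
    ((PySem.List.sorted attendance_records (fun x => pvLookup x "date") true).foldl
      (fun (st : Int × Int) r =>
        if pvLookup r "status" = "absent" then (st.1 + 1, max st.2 (st.1 + 1)) else (0, st.2))
      (0, 0)).2

-- ===== PORT B =====
-- maximal runs of equal elements: the while-loop grouper of Source B (j - i = 1 + #following equal elements)
def pvRuns : List String → List (String × Int)
  | [] => []
  | x :: rest =>
      (x, (1 : Int) + (rest.takeWhile (fun y => y == x)).length) :: pvRuns (rest.dropWhile (fun y => y == x))
termination_by l => l.length
decreasing_by
  have := List.length_dropWhile_le (fun y => y == x) rest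
  simp; omega

def calculate_consecutive_absences_alt (attendance_records : List (List (String × String))) : Int :=
  let statuses := (PySem.List.sorted attendance_records (fun x => pvLookup x "date") true).map
    (fun r => pvLookup r "status")
  let lens := (pvRuns statuses).filterMap (fun p => if p.1 = "absent" then some p.2 else none)
  (PySem.List.max? lens (fun y => y)).getD 0

-- ===== PRECONDITION & SPEC =====
-- Pre_ excludes exactly the inputs on which Python A raises KeyError: a record missing the 'date' or 'status' key.
def Pre_calculate_consecutive_absences (attendance_records : List (List (String × String))) : Prop :=
  (attendance_records.all (fun r => r.any (fun p => p.1 == "date") && r.any (fun p => p.1 == "status"))) = true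
instance (attendance_records : List (List (String × String))) : Decidable (Pre_calculate_consecutive_absences attendance_records) := by unfold Pre_calculate_consecutive_absences; infer_instance

def pvWitness_calculate_consecutive_absences : (List (List (String × String))) :=
  [[("date", "2024-01-02"), ("status", "absent")], [("date", "2024-01-01"), ("status", "present")]]

def Spec_calculate_consecutive_absences (attendance_records : List (List (String × String))) (out : Int) : Prop := out = calculate_consecutive_absences_alt attendance_records
instance (attendance_records : List (List (String × String))) (out : Int) : Decidable (Spec_calculate_consecutive_absences attendance_records out) := by unfold Spec_calculate_consecutive_absences; infer_instance

-- ===== CLAIM (what is proved, stated in full; the proofs are below) =====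
def Claim_equal_calculate_consecutive_absences : Prop := ∀ (attendance_records : List (List (String × String))), Dom_calculate_consecutive_absences attendance_records → Pre_calculate_consecutive_absences attendance_records → Spec_calculate_consecutive_absences attendance_records (calculate_consecutive_absences attendance_records)

-- ===== LEMMAS AND PROOFS =====

-- A's loop body, on the status string only
def pvStep (st : Int × Int) (s : String) : Int × Int :=
  if s = "absent" then (st.1 + 1, max st.2 (st.1 + 1)) else (0, st.2)

-- the lengths of the 'absent' runs
def pvAbsLens (ss : List String) : List Int :=
  (pvRuns ss).filterMap (fun p => if p.1 = "absent" then some p.2 else none)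

-- B's value on a status sequence
def pvMval (ls : List Int) : Int := (PySem.List.max? ls (fun y => y)).getD 0

lemma pvRuns_cons (x : String) (rest : List String) :
    pvRuns (x :: rest)
      = (x, (1 : Int) + (rest.takeWhile (fun y => y == x)).length)
          :: pvRuns (rest.dropWhile (fun y => y == x)) := by
  rw [pvRuns]

lemma dropWhile_head_false {p : String → Bool} : ∀ {l : List String} {h : String} {t : List String},
    l.dropWhile p = h :: t → p h = false := by
  intro l
  induction l with
  | nil => intro h t e; simp at e
  | cons a l' ih =>
      intro h t e
      rw [List.dropWhile_cons] at e
      split at e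
      · exact ih e
      · next hp =>
          cases e
          simpa using hp

lemma foldl_max_comm (t : List Int) : ∀ a b : Int, t.foldl max (max a b) = max a (t.foldl max b) := by
  induction t with
  | nil => intro a b; simp
  | cons c t ih =>
      intro a b
      simp only [List.foldl_cons]
      rw [max_assoc]
      exact ih a (max b c)

lemma pvMval_cons (L : Int) (ls : List Int) (hL : 0 ≤ L) :
    pvMval (L :: ls) = max L (pvMval ls) := by
  cases ls with
  | nil =>
      simp only [pvMval, PySem.List.max?_id_cons, Option.getD_some, List.foldl_nil]
      simp [PySem.List.max?]
      omega
  | cons y ys =>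
      simp only [pvMval, PySem.List.max?_id_cons, Option.getD_some, List.foldl_cons]
      exact foldl_max_comm ys L y

-- an all-'absent' block advances the counter by its length
lemma foldl_absent_block (blk : List String) :
    ∀ (c m : Int), (∀ s ∈ blk, s = "absent") → c ≤ m →
      blk.foldl pvStep (c, m) = (c + blk.length, max m (c + blk.length)) := by
  induction blk with
  | nil => intro c m _ hcm; simp [max_eq_left hcm]
  | cons s blk ih =>
      intro c m hall hcm
      have hs : s = "absent" := hall s (List.mem_cons_self ..)
      rw [List.foldl_cons, show pvStep (c, m) s = (c + 1, max m (c + 1)) by simp [pvStep, hs]]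
      rw [ih (c + 1) (max m (c + 1)) (fun t ht => hall t (List.mem_cons_of_mem _ ht)) (le_max_right _ _)]
      have h1 : c + 1 + (blk.length : Int) = c + ((s :: blk).length : Int) := by
        simp; omega
      have h2 : max (max m (c + 1)) (c + ((s :: blk).length : Int))
          = max m (c + ((s :: blk).length : Int)) := by
        rw [max_assoc]
        congr 1
        apply max_eq_right
        simp only [List.length_cons]
        push_cast
        omega
      rw [h1, h2]

-- a block with no 'absent' leaves the state (0, m) unchanged
lemma foldl_noabs_block (blk : List String) :
    ∀ (m : Int), (∀ s ∈ blk, s ≠ "absent") → blk.foldl pvStep (0, m) = (0, m) := by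
  induction blk with
  | nil => intro m _; rfl
  | cons s blk ih =>
      intro m hall
      have hs : s ≠ "absent" := hall s (List.mem_cons_self ..)
      simp only [List.foldl_cons, pvStep, if_neg hs]
      exact ih m (fun t ht => hall t (List.mem_cons_of_mem _ ht))

-- main invariant: A's scan from (0, m) computes max m (B's runs value)
lemma scan_eq_runs : ∀ (n : Nat) (ss : List String) (m : Int), ss.length ≤ n → 0 ≤ m →
    (ss.foldl pvStep (0, m)).2 = max m (pvMval (pvAbsLens ss)) := by
  intro n
  induction n with
  | zero =>
      intro ss m hlen hm
      have : ss = [] := List.eq_nil_of_length_eq_zero (Nat.le_zero.mp hlen)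
      subst this
      simp [pvAbsLens, pvRuns, pvMval, PySem.List.max?, max_eq_left hm]
  | succ n ih =>
      intro ss m hlen hm
      cases ss with
      | nil => simp [pvAbsLens, pvRuns, pvMval, PySem.List.max?, max_eq_left hm]
      | cons x rest =>
        have hrest : rest.length ≤ n := by simpa using hlen
        have hsplit : rest.takeWhile (fun y => y == x) ++ rest.dropWhile (fun y => y == x) = rest :=
          List.takeWhile_append_dropWhile
        have htw : ∀ s ∈ rest.takeWhile (fun y => y == x), s = x := by
          intro s hmem
          have := List.mem_takeWhile_imp hmem
          exact eq_of_beq this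
        set same := rest.takeWhile (fun y => y == x) with hsame
        set rest' := rest.dropWhile (fun y => y == x) with hrest'
        have hdec : (x :: rest).foldl pvStep (0, m)
            = rest'.foldl pvStep ((x :: same).foldl pvStep (0, m)) := by
          have : x :: rest = (x :: same) ++ rest' := by
            simp [hsplit]
          rw [this, List.foldl_append]
        have hAbsLens : pvAbsLens (x :: rest)
            = (if x = "absent" then [((1 : Int) + same.length)] else []) ++ pvAbsLens rest' := by
          simp only [pvAbsLens, pvRuns_cons, List.filterMap_cons, ← hsame, ← hrest']
          by_cases hx : x = "absent"
          · rw [if_pos hx]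
            simp only [hx, reduceIte]
            rfl
          · rw [if_neg hx]
            simp only [hx, reduceIte]
            rfl
        by_cases hx : x = "absent"
        · -- leading absent block of length L = 1 + |same|
          have hblk : (x :: same).foldl pvStep (0, m)
              = ((0 : Int) + (x :: same).length, max m ((0 : Int) + (x :: same).length)) := by
            apply foldl_absent_block
            · intro s hs
              rcases List.mem_cons.mp hs with h | h
              · rw [h, hx]
              · rw [htw s h, hx]
            · exact hm
          set L : Int := 1 + (same.length : Int) with hL
          have hLpos : 0 ≤ L := by positivity
          have hLen : (0 : Int) + (x :: same).length = L := by simp only [List.length_cons, hL]; push_cast; omega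
          cases hre : rest' with
          | nil =>
              rw [hdec, hblk, hLen, hre]
              simp only [List.foldl_nil]
              rw [hAbsLens, hre, if_pos hx]
              have : pvAbsLens [] = [] := by simp [pvAbsLens, pvRuns]
              rw [this] at *
              simp [pvMval, PySem.List.max?_id_cons, hL]
          | cons h t =>
              have hh : h ≠ "absent" := by
                have := dropWhile_head_false (p := fun y => y == x) (l := rest) (by rw [← hrest', hre])
                simp at this
                rw [hx] at this; exact this
              -- one step on h resets the counter, then the h-block keeps it, then recurse
              have hsplit2 : t.takeWhile (fun y => y == h) ++ t.dropWhile (fun y => y == h) = t :=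
                List.takeWhile_append_dropWhile
              set same2 := t.takeWhile (fun y => y == h) with hsame2
              set rest'' := t.dropWhile (fun y => y == h) with hrest''
              have htw2 : ∀ s ∈ same2, s ≠ "absent" := by
                intro s hs
                have := List.mem_takeWhile_imp hs
                rw [eq_of_beq this]; exact hh
              have hstep : pvStep (L, max m L) h = (0, max m L) := by
                simp [pvStep, hh]
              have hfold : (h :: t).foldl pvStep (L, max m L)
                  = rest''.foldl pvStep (0, max m L) := by
                have : h :: t = (h :: same2) ++ rest'' := by simp [hsplit2]
                rw [this, List.foldl_append]
                simp only [List.foldl_cons, hstep]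
                rw [foldl_noabs_block same2 (max m L) htw2]
              have hlen'' : rest''.length ≤ n := by
                have h1 : rest'.length ≤ rest.length := by
                  rw [hrest']; exact List.length_dropWhile_le _ _
                have h2 : rest''.length ≤ t.length := by
                  rw [hrest'']; exact List.length_dropWhile_le _ _
                rw [hre] at h1; simp at h1
                omega
              have hrec := ih rest'' (max m L) hlen'' (le_trans hm (le_max_left _ _))
              -- absent-run lengths: first run of rest' (= h-run) is dropped
              have hAL' : pvAbsLens rest' = pvAbsLens rest'' := by
                rw [hre]
                simp only [pvAbsLens, pvRuns_cons, List.filterMap_cons]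
                simp only [if_neg hh]
                rw [← hrest'']
              rw [hdec, hblk, hLen, hre, hfold, hrec, hAbsLens, hre, if_pos hx]
              simp only [List.singleton_append]
              rw [← hre, hAL', pvMval_cons L _ hLpos]
              rw [max_assoc]
        · -- leading non-absent block: state stays (0, m)
          have hblk : (x :: same).foldl pvStep (0, m) = (0, m) := by
            apply foldl_noabs_block
            intro s hs
            rcases List.mem_cons.mp hs with h | h
            · rw [h]; exact hx
            · rw [htw s h]; exact hx
          have hlen' : rest'.length ≤ n := by
            have : rest'.length ≤ rest.length := by
              rw [hrest']; exact List.length_dropWhile_le _ _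
            omega
          rw [hdec, hblk, ih rest' m hlen' hm, hAbsLens, if_neg hx, List.nil_append]

lemma pvRuns_snd_pos : ∀ ss (p : String × Int), p ∈ pvRuns ss → 1 ≤ p.2 := by
  intro ss
  induction ss using pvRuns.induct with
  | case1 => intro p hp; simp [pvRuns] at hp
  | case2 x rest ih =>
      intro p hp
      rw [pvRuns_cons] at hp
      rcases List.mem_cons.mp hp with h | h
      · subst h; simp
      · exact ih p h

-- ===== VERDICT (by name: the statement is the Claim_ definition above) =====
theorem calculate_consecutive_absences_spec : Claim_equal_calculate_consecutive_absences := by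
  intro rs _ _
  unfold Spec_calculate_consecutive_absences
  unfold calculate_consecutive_absences calculate_consecutive_absences_alt
  by_cases hnil : rs = []
  · subst hnil
    simp [PySem.List.sorted, pvRuns, PySem.List.max?]
  · rw [if_neg hnil]
    set srt := PySem.List.sorted rs (fun x => pvLookup x "date") true with hsrt
    have hmapfold :
        (srt.foldl (fun (st : Int × Int) r =>
            if pvLookup r "status" = "absent" then (st.1 + 1, max st.2 (st.1 + 1)) else (0, st.2))
          ((0 : Int), (0 : Int)))
        = (srt.map (fun r => pvLookup r "status")).foldl pvStep ((0 : Int), (0 : Int)) := by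
      rw [List.foldl_map]
      rfl
    rw [hmapfold]
    have := scan_eq_runs (srt.map (fun r => pvLookup r "status")).length
      (srt.map (fun r => pvLookup r "status")) 0 le_rfl le_rfl
    rw [this]
    have h0 : (0 : Int) ≤ pvMval (pvAbsLens (srt.map (fun r => pvLookup r "status"))) := by
      unfold pvMval
      cases hc : PySem.List.max? (pvAbsLens (srt.map (fun r => pvLookup r "status"))) (fun y => y) with
      | none => simp
      | some v =>
          have hv := PySem.List.max?_mem hc
          have hpos : ∀ z ∈ pvAbsLens (srt.map (fun r => pvLookup r "status")), (1 : Int) ≤ z := by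
            intro z hz
            unfold pvAbsLens at hz
            rcases List.mem_filterMap.mp hz with ⟨p, hpmem, hp⟩
            by_cases hpa : p.1 = "absent"
            · rw [if_pos hpa] at hp
              cases hp
              exact pvRuns_snd_pos _ p hpmem
            · rw [if_neg hpa] at hp; cases hp
          have := hpos v hv
          simp; omega
    rw [max_eq_right h0]
    rfl
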